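-- pv_equiv track=rewrite | github.com/Vap-San/Python | DZ3/z3.2.py | multiply_pairs
-- ===== SOURCE A (Python) =====
-- def multiply_pairs(list_numbers):
--     list_pair_of_numbers = []
--     while len(list_numbers) > 1:
--         list_pair_of_numbers.append(list_numbers[0]*list_numbers[-1])
--         del list_numbers[0]
--         del list_numbers[-1]
--     if len(list_numbers) == 1:
--         list_pair_of_numbers.append(list_numbers[0])
--     return list_pair_of_numbers
-- ===== SOURCE B (Python) =====
-- def multiply_pairs(list_numbers):
--     # O(n) two-index version; does NOT mutate its argument (A empties it in place).
--     n = len(list_numbers)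
--     result = [list_numbers[i] * list_numbers[n - 1 - i] for i in range(n // 2)]
--     if n % 2:
--         result.append(list_numbers[n // 2])
--     return result
-- ===== Notes on version B (the rewrite author's own statement) =====
-- stated objective: faster
-- what changed: replaces the destructive loop that repeatedly deletes the first and last element (each del is O(n)) with a single index-based pass pairing i with n-1-i; B does not mutate the argument (return value is identical).
import Mathlib
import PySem

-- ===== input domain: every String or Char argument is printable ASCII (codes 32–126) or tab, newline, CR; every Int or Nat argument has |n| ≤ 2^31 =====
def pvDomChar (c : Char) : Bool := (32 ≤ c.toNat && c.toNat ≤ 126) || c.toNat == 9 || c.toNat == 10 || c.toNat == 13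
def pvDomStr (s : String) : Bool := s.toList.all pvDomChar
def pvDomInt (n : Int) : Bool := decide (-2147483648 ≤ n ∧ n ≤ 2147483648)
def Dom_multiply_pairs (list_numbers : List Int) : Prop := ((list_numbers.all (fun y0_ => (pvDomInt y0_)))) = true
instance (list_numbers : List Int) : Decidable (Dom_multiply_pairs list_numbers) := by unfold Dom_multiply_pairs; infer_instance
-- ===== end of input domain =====

-- B replaces A's destructive delete-from-both-ends loop by one index pass pairing i with n-1-i
-- (equivalence is about the RETURN value: A empties its argument in place, B does not mutate it).

-- ===== PORT A =====
-- A's while-loop: while the list has > 1 elements, emit first*last and delete both ends;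
-- a single leftover element is appended as is.
def multiply_pairs (list_numbers : List Int) : List Int :=
  match h : list_numbers with
  | [] => []
  | [a] => [a]
  | a :: b :: rest =>
      (a * (b :: rest).getLast (by simp)) :: multiply_pairs ((b :: rest).dropLast)
termination_by list_numbers.length
decreasing_by simp [List.length_dropLast]

-- ===== PORT B =====
def multiply_pairs_alt (list_numbers : List Int) : List Int :=
  let n := list_numbers.length
  ((List.range (n / 2)).map (fun i => list_numbers.getD i 0 * list_numbers.getD (n - 1 - i) 0)) ++
  (if n % 2 = 1 then [list_numbers.getD (n / 2) 0] else [])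

-- ===== PRECONDITION & SPEC =====
def Spec_multiply_pairs (list_numbers : List Int) (out : List Int) : Prop := out = multiply_pairs_alt list_numbers
instance (list_numbers : List Int) (out : List Int) : Decidable (Spec_multiply_pairs list_numbers out) := by unfold Spec_multiply_pairs; infer_instance

-- ===== CLAIM (what is proved, stated in full; the proofs are below) =====
def Claim_equal_multiply_pairs : Prop := ∀ (list_numbers : List Int), Dom_multiply_pairs list_numbers → Spec_multiply_pairs list_numbers (multiply_pairs list_numbers)

-- ===== LEMMAS AND PROOFS =====

theorem alt_both_ends (a b : Int) (mid : List Int) :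
    multiply_pairs_alt (a :: mid ++ [b]) = (a * b) :: multiply_pairs_alt mid := by
  have hm : (a :: (mid ++ [b])).length = mid.length + 2 := by simp
  have h2 : (mid.length + 2) / 2 = mid.length / 2 + 1 := by omega
  have h2' : (mid.length + 2) % 2 = mid.length % 2 := by omega
  have gb : (a :: (mid ++ [b])).getD (mid.length + 1) 0 = b := by
    simp [List.getD]
  have gmid : ∀ i, i < mid.length → (a :: (mid ++ [b])).getD (i + 1) 0 = mid.getD i 0 := by
    intro i hi
    simp [List.getD, List.getElem?_append_left hi]
  simp only [multiply_pairs_alt, List.cons_append, hm, h2, h2', List.range_succ_eq_map]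
  simp only [List.map_cons, List.map_map]
  have hhead : (a :: (mid ++ [b])).getD 0 0 * (a :: (mid ++ [b])).getD (mid.length + 2 - 1 - 0) 0
      = a * b := by
    have : mid.length + 2 - 1 - 0 = mid.length + 1 := by omega
    rw [this, gb]; simp [List.getD]
  rw [List.cons_append, hhead]
  congr 1
  congr 1
  · apply List.map_congr_left
    intro i hi
    have hi' : i < mid.length / 2 := List.mem_range.mp hi
    have hil : i < mid.length := by omega
    have he1 : (a :: (mid ++ [b])).getD (Nat.succ i) 0 = mid.getD i 0 := gmid i hil
    have he2 : mid.length + 2 - 1 - Nat.succ i = (mid.length - 1 - i) + 1 := by omega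
    have he3 : mid.length - 1 - i < mid.length := by omega
    simp only [Function.comp, he2, gmid _ he3]
    rw [he1]
  · by_cases hpar : mid.length % 2 = 1
    · have : mid.length / 2 < mid.length := by omega
      simp [hpar, List.getElem?_append_left this]
    · simp [hpar]

theorem eq_all (xs : List Int) : multiply_pairs xs = multiply_pairs_alt xs := by
  fun_induction multiply_pairs xs with
  | case1 => simp [multiply_pairs_alt]
  | case2 a => simp [multiply_pairs_alt, List.getD]
  | case3 a b rest ih =>
    have hsplit : b :: rest = (b :: rest).dropLast ++ [(b :: rest).getLast (by simp)] :=
      (List.dropLast_append_getLast (by simp)).symm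
    calc (a * (b :: rest).getLast (by simp)) :: multiply_pairs ((b :: rest).dropLast)
        = (a * (b :: rest).getLast (by simp)) :: multiply_pairs_alt ((b :: rest).dropLast) := by
          rw [ih]
      _ = multiply_pairs_alt (a :: (b :: rest).dropLast ++ [(b :: rest).getLast (by simp)]) :=
          (alt_both_ends _ _ _).symm
      _ = multiply_pairs_alt (a :: b :: rest) := by rw [List.cons_append, ← hsplit]

-- ===== VERDICT (by name: the statement is the Claim_ definition above) =====
theorem multiply_pairs_spec : Claim_equal_multiply_pairs := by
  intro xs _; exact eq_all xs
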